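-- pv_equiv track=rewrite | github.com/jimjrxieb/LinkOps | fix_flake8.py | fix_migration_imports
-- ===== SOURCE A (Python) =====
-- def fix_migration_imports(content):
--     """Fix migration file imports"""
--     lines = content.split('\n')
--     fixed_lines = []
--
--     # Move imports to top
--     imports = []
--     other_lines = []
--
--     for line in lines:
--         if line.strip().startswith('import ') or line.strip().startswith('from '):
--             imports.append(line)
--         else:
--             other_lines.append(line)
--
--     # Add imports at the top
--     fixed_lines.extend(imports)
--     fixed_lines.extend(other_lines)
--
--     return '\n'.join(fixed_lines)
-- ===== SOURCE B (Python) =====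
-- def fix_migration_imports(content):
--     """Fix migration file imports"""
--     return '\n'.join(sorted(
--         content.split('\n'),
--         key=lambda line: 0 if (line.strip().startswith('import ')
--                                or line.strip().startswith('from ')) else 1,
--     ))
-- ===== Notes on version B (the rewrite author's own statement) =====
-- stated objective: idiomatic
-- what changed: Replaces the explicit imports/other_lines partition loop with a single stable sort on a 0/1 key, so imports float to the top while each group keeps its relative order.
import Mathlib
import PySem

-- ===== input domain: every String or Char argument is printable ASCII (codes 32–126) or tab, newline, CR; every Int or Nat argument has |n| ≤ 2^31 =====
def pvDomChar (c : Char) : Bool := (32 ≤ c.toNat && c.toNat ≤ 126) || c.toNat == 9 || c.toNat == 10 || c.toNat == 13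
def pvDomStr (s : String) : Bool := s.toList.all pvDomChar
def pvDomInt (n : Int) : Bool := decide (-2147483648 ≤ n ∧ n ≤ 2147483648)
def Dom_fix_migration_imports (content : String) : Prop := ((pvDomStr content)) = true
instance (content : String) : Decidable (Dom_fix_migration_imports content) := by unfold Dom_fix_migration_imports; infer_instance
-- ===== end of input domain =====

-- B replaces A's explicit imports/other_lines partition with a single stable sort on a 0/1 key (idiomatic; same result).


-- shared helper: the line predicate 'line.strip().startswith("import ") or line.strip().startswith("from ")'
def pvIsImport (line : String) : Bool :=
  PySem.Str.startswith (PySem.Str.strip line) "import " || PySem.Str.startswith (PySem.Str.strip line) "from "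

-- ===== PORT A =====
-- partition loop: imports / other_lines, then concatenate
def fix_migration_imports (content : String) : String :=
  let lines := (PySem.Str.split? content "\n").getD []
  let p := lines.foldl
    (fun (acc : List String × List String) line =>
      if pvIsImport line then (acc.1 ++ [line], acc.2) else (acc.1, acc.2 ++ [line]))
    ([], [])
  PySem.Str.join "\n" (p.1 ++ p.2)

-- ===== PORT B =====
-- stable sort on the 0/1 key
def fix_migration_imports_alt (content : String) : String :=
  let lines := (PySem.Str.split? content "\n").getD []
  PySem.Str.join "\n" (PySem.List.sorted lines (fun line => if pvIsImport line then (0 : Int) else 1) false)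

-- ===== PRECONDITION & SPEC =====
def Spec_fix_migration_imports (content : String) (out : String) : Prop := out = fix_migration_imports_alt content
instance (content : String) (out : String) : Decidable (Spec_fix_migration_imports content out) := by unfold Spec_fix_migration_imports; infer_instance

-- ===== CLAIM (what is proved, stated in full; the proofs are below) =====
def Claim_equal_fix_migration_imports : Prop := ∀ (content : String), Dom_fix_migration_imports content → Spec_fix_migration_imports content (fix_migration_imports content)

-- ===== LEMMAS AND PROOFS =====

-- the 0/1 key and the comparison used by the stable insertion sort
def pvKey (line : String) : Int := if pvIsImport line then 0 else 1
def pvBef (a b : String) : Bool := decide (pvKey a < pvKey b)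

lemma pvBef_false_of_import {x y : String} (hx : pvIsImport x = true) (hy : pvIsImport y = true) :
    pvBef x y = false := by simp [pvBef, pvKey, hx, hy]

lemma pvBef_false_of_other {x : String} (hx : pvIsImport x = false) (y : String) :
    pvBef x y = false := by
  simp only [pvBef, pvKey, hx, if_false]
  by_cases h : pvIsImport y <;> simp [h]

lemma pvBef_true_of_import_other {x y : String} (hx : pvIsImport x = true) (hy : pvIsImport y = false) :
    pvBef x y = true := by simp [pvBef, pvKey, hx, hy]

-- inserting past a prefix none of whose elements x goes before
lemma insertBy_append (x : String) (F G : List String)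
    (hF : ∀ y ∈ F, pvBef x y = false) :
    PySem.List.insertBy pvBef x (F ++ G) = F ++ PySem.List.insertBy pvBef x G := by
  induction F with
  | nil => rfl
  | cons f F' ih =>
      have hf := hF f (by simp)
      simp [PySem.List.insertBy, hf, ih (fun y hy => hF y (by simp [hy]))]

-- an import line inserted into a block of non-import lines lands at its front
lemma insertBy_front (x : String) (G : List String) (hx : pvIsImport x = true)
    (hG : ∀ y ∈ G, pvIsImport y = false) :
    PySem.List.insertBy pvBef x G = x :: G := by
  cases G with
  | nil => rfl
  | cons g G' =>
      have : pvBef x g = true := pvBef_true_of_import_other hx (hG g (by simp))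
      simp [PySem.List.insertBy, this]

-- the main invariant: insertion sort over the 0/1 key computes exactly A's partition
lemma sort_partition (lines F G : List String)
    (hF : ∀ y ∈ F, pvIsImport y = true) (hG : ∀ y ∈ G, pvIsImport y = false) :
    lines.foldl (fun acc x => PySem.List.insertBy pvBef x acc) (F ++ G) =
    (lines.foldl
      (fun (acc : List String × List String) line =>
        if pvIsImport line then (acc.1 ++ [line], acc.2) else (acc.1, acc.2 ++ [line]))
      (F, G)).1 ++
    (lines.foldl
      (fun (acc : List String × List String) line =>
        if pvIsImport line then (acc.1 ++ [line], acc.2) else (acc.1, acc.2 ++ [line]))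
      (F, G)).2 := by
  induction lines generalizing F G with
  | nil => simp
  | cons x rest ih =>
      by_cases hx : pvIsImport x = true
      · have h1 : PySem.List.insertBy pvBef x (F ++ G) = (F ++ [x]) ++ G := by
          rw [insertBy_append x F G (fun y hy => pvBef_false_of_import hx (hF y hy)),
              insertBy_front x G hx hG]
          simp
        simp only [List.foldl_cons, hx, if_true, h1]
        exact ih (F ++ [x]) G
          (by intro y hy; rcases List.mem_append.mp hy with h | h
              · exact hF y h
              · simp at h; simpa [h] using hx) hG
      · have hx' : pvIsImport x = false := by simpa using hx
        have h1 : PySem.List.insertBy pvBef x (F ++ G) = F ++ (G ++ [x]) := by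
          rw [PySem.List.insertBy_of_forall_not_before pvBef x (F ++ G)
              (fun y _ => pvBef_false_of_other hx' y)]
          simp
        simp only [List.foldl_cons, hx', if_false, h1]
        exact ih F (G ++ [x]) hF
          (by intro y hy; rcases List.mem_append.mp hy with h | h
              · exact hG y h
              · simp at h; simpa [h] using hx')

-- ===== VERDICT (by name: the statement is the Claim_ definition above) =====
theorem fix_migration_imports_spec : Claim_equal_fix_migration_imports := by
  intro content _
  show fix_migration_imports content = fix_migration_imports_alt content
  show PySem.Str.join "\n"
      ((((PySem.Str.split? content "\n").getD []).foldl
        (fun (acc : List String × List String) line =>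
          if pvIsImport line then (acc.1 ++ [line], acc.2) else (acc.1, acc.2 ++ [line]))
        ([], [])).1 ++
       (((PySem.Str.split? content "\n").getD []).foldl
        (fun (acc : List String × List String) line =>
          if pvIsImport line then (acc.1 ++ [line], acc.2) else (acc.1, acc.2 ++ [line]))
        ([], [])).2) =
    PySem.Str.join "\n"
      (PySem.List.sorted ((PySem.Str.split? content "\n").getD [])
        (fun line => if pvIsImport line then (0 : Int) else 1) false)
  rw [PySem.List.sorted_eq_foldl_insertBy]
  have h := sort_partition ((PySem.Str.split? content "\n").getD []) [] []
    (by simp) (by simp)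
  simp only [List.nil_append] at h
  rw [show (fun (a b : String) =>
        decide ((if pvIsImport a then (0 : Int) else 1) < if pvIsImport b then (0 : Int) else 1)) = pvBef
      from by funext a b; simp [pvBef, pvKey]]
  rw [h]
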